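-- pv_equiv track=rewrite | github.com/prakashUXtech/pdf-xl-compare | app/services/ocr/legacy/ocr.py | extract_text_by_y_position
-- ===== SOURCE A (Python) =====
-- def extract_text_by_y_position(annotations):
--     """Group text annotations by their y-position."""
--     # Convert annotations to a list of (text, y, x) tuples
--     text_positions = [(ann[0].strip(), ann[2][1], ann[2][0]) for ann in annotations]
--
--     # Sort by y-position (top to bottom)
--     sorted_positions = sorted(text_positions, key=lambda x: x[1])
--
--     # Group by y-position using a threshold
--     threshold = 5  # Pixels threshold for line grouping
--     current_y = None
--     current_group = []
--     groups = []
--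
--     for text, y, x in sorted_positions:
--         if not text:  # Skip empty text
--             continue
--
--         if current_y is None:
--             current_y = y
--             current_group = [(text, x)]
--         elif abs(y - current_y) <= threshold:
--             current_group.append((text, x))
--         else:
--             # Sort group by x-position before adding
--             current_group.sort(key=lambda x: x[1])
--             texts = [t for t, _ in current_group]
--             if texts:  # Only include non-empty groups
--                 groups.append(texts)
--             current_group = [(text, x)]
--             current_y = y
--
--     if current_group:
--         current_group.sort(key=lambda x: x[1])
--         texts = [t for t, _ in current_group]
--         if texts:
--             groups.append(texts)
--
--     return groups
-- ===== SOURCE B (Python) =====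
-- def extract_text_by_y_position(annotations):
--     """Group text annotations by their y-position (split-into-chunks formulation)."""
--     pts = sorted(((a[0].strip(), a[2][1], a[2][0]) for a in annotations),
--                  key=lambda p: p[1])
--     pts = [p for p in pts if p[0]]  # drop empty texts
--     groups = []
--     while pts:
--         anchor = pts[0][1]
--         k = 1
--         while k < len(pts) and pts[k][1] - anchor <= 5:
--             k += 1
--         groups.append([(t, x) for t, _, x in pts[:k]])
--         pts = pts[k:]
--     return [[t for t, _ in sorted(g, key=lambda p: p[1])] for g in groups]
-- ===== Notes on version B (the rewrite author's own statement) =====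
-- stated objective: simpler
-- what changed: Replaces A's stateful fold (current_y/current_group/groups accumulators with interleaved per-group sort-and-extract and a trailing flush) by a prefix-splitting pass: after sorting and dropping empties, repeatedly slice off the maximal chunk whose y stays within 5 of the chunk's first y, then format all chunks in one final comprehension.
import Mathlib
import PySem

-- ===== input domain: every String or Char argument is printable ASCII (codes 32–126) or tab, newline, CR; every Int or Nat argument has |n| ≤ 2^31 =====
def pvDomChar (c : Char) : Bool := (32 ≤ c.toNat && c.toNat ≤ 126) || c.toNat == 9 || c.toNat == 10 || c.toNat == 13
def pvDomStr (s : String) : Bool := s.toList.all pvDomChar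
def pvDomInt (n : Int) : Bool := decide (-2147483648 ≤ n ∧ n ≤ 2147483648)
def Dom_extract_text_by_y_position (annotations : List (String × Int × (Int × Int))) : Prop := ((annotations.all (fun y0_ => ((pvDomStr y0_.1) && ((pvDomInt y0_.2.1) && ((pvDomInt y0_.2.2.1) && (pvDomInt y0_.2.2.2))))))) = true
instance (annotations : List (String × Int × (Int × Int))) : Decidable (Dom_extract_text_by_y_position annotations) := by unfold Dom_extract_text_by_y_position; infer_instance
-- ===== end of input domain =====

-- B restates A's interleaved accumulator fold as: sort, drop empties, split off maximal
-- y-chunks anchored at each chunk's first y, then format every chunk in one final pass (objective: simpler).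

-- ===== PORT A =====
-- sort the group by x, then extract the texts ('current_group.sort(...); texts = [t for t, _ in current_group]')
def pvFmt (g : List (String × Int)) : List String :=
  (PySem.List.sorted g (fun q => q.2) false).map (fun q => q.1)

-- the non-skip part of A's loop body (current_y is None / within threshold / new group)
def pvGroupStepA (st : Option Int × List (String × Int) × List (List String))
    (p : String × Int × Int) : Option Int × List (String × Int) × List (List String) :=
  match st.1 with
  | none => (some p.2.1, [(p.1, p.2.2)], st.2.2)
  | some cy =>
    if |p.2.1 - cy| ≤ 5 then (some cy, st.2.1 ++ [(p.1, p.2.2)], st.2.2)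
    else
      let texts := pvFmt st.2.1
      (some p.2.1, [(p.1, p.2.2)], if texts ≠ [] then st.2.2 ++ [texts] else st.2.2)

-- one loop iteration: 'if not text: continue' then the three branches
def pvStepA (st : Option Int × List (String × Int) × List (List String))
    (p : String × Int × Int) : Option Int × List (String × Int) × List (List String) :=
  if p.1 == "" then st else pvGroupStepA st p

-- the final 'if current_group:' flush
def pvFinishA (st : Option Int × List (String × Int) × List (List String)) : List (List String) :=
  if st.2.1 ≠ [] then
    let texts := pvFmt st.2.1
    if texts ≠ [] then st.2.2 ++ [texts] else st.2.2
  else st.2.2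

def extract_text_by_y_position (annotations : List (String × Int × (Int × Int))) : List (List String) :=
  let text_positions := annotations.map (fun ann => (PySem.Str.strip ann.1, ann.2.2.2, ann.2.2.1))
  let sorted_positions := PySem.List.sorted text_positions (fun p => p.2.1) false
  pvFinishA (sorted_positions.foldl pvStepA (none, [], []))

-- ===== PORT B =====
-- the inner while loop: slice off the maximal prefix whose y stays within 5 of the first y
def pvSplitB (pts : List (String × Int × Int)) : List (List (String × Int)) :=
  match pts with
  | [] => []
  | p :: rest =>
    ((p :: rest.takeWhile (fun q => decide (q.2.1 - p.2.1 ≤ 5))).map (fun q => (q.1, q.2.2)))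
      :: pvSplitB (rest.dropWhile (fun q => decide (q.2.1 - p.2.1 ≤ 5)))
termination_by pts.length
decreasing_by
  simp only [List.length_cons]
  exact Nat.lt_succ_of_le (List.length_dropWhile_le _ _)

def extract_text_by_y_position_alt (annotations : List (String × Int × (Int × Int))) : List (List String) :=
  let pts := PySem.List.sorted (annotations.map (fun a => (PySem.Str.strip a.1, a.2.2.2, a.2.2.1)))
    (fun p => p.2.1) false
  let pts := pts.filter (fun p => p.1 != "")
  (pvSplitB pts).map pvFmt

-- ===== PRECONDITION & SPEC =====
def Spec_extract_text_by_y_position (annotations : List (String × Int × (Int × Int))) (out : List (List String)) : Prop := out = extract_text_by_y_position_alt annotations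
instance (annotations : List (String × Int × (Int × Int))) (out : List (List String)) : Decidable (Spec_extract_text_by_y_position annotations out) := by unfold Spec_extract_text_by_y_position; infer_instance

-- ===== CLAIM (what is proved, stated in full; the proofs are below) =====
def Claim_equal_extract_text_by_y_position : Prop := ∀ (annotations : List (String × Int × (Int × Int))), Dom_extract_text_by_y_position annotations → Spec_extract_text_by_y_position annotations (extract_text_by_y_position annotations)

-- ===== LEMMAS AND PROOFS =====

lemma pvSplitB_cons (p : String × Int × Int) (rest : List (String × Int × Int)) :
    pvSplitB (p :: rest) =
      ((p :: rest.takeWhile (fun q => decide (q.2.1 - p.2.1 ≤ 5))).map (fun q => (q.1, q.2.2)))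
        :: pvSplitB (rest.dropWhile (fun q => decide (q.2.1 - p.2.1 ≤ 5))) := by
  rw [pvSplitB.eq_def]

lemma pvFmt_ne_nil (g : List (String × Int)) (h : g ≠ []) : pvFmt g ≠ [] := by
  unfold pvFmt
  intro hc
  have := congrArg List.length hc
  simp [PySem.List.length_sorted] at this
  exact h this

-- skipping empty texts in the fold = folding the filtered list
lemma pv_skip (l : List (String × Int × Int)) (init : Option Int × List (String × Int) × List (List String)) :
    l.foldl pvStepA init = (l.filter (fun p => p.1 != "")).foldl pvGroupStepA init := by
  induction l generalizing init with
  | nil => rfl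
  | cons p t ih =>
    by_cases h : p.1 = ""
    · simp [h, pvStepA, ih]
    · simp [h, pvStepA, ih]

-- main invariant: A's fold-and-flush from an open group = emitted groups ++ B's chunk splitting
lemma pv_main (l : List (String × Int × Int)) (a : Int) (g : List (String × Int))
    (gs : List (List String))
    (hs : l.Pairwise (fun p q => p.2.1 ≤ q.2.1))
    (hlb : ∀ q ∈ l, a ≤ q.2.1) (hg : g ≠ []) :
    pvFinishA (l.foldl pvGroupStepA (some a, g, gs)) =
      gs ++ pvFmt (g ++ (l.takeWhile (fun q => decide (q.2.1 - a ≤ 5))).map (fun q => (q.1, q.2.2)))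
        :: (pvSplitB (l.dropWhile (fun q => decide (q.2.1 - a ≤ 5)))).map pvFmt := by
  induction l generalizing a g gs with
  | nil =>
    simp [pvFinishA, hg, pvFmt_ne_nil g hg, pvSplitB]
  | cons q t ih =>
    have hq : a ≤ q.2.1 := hlb q (List.mem_cons_self)
    have hs' := (List.pairwise_cons.mp hs).2
    have hhd := (List.pairwise_cons.mp hs).1
    by_cases h : q.2.1 - a ≤ 5
    · have habs : |q.2.1 - a| ≤ 5 := by rw [abs_of_nonneg (by omega)]; exact h
      have hstep : pvGroupStepA (some a, g, gs) q = (some a, g ++ [(q.1, q.2.2)], gs) := by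
        simp [pvGroupStepA, habs]
      rw [List.foldl_cons, hstep,
        ih a (g ++ [(q.1, q.2.2)]) gs hs' (fun r hr => hlb r (List.mem_cons_of_mem _ hr)) (by simp)]
      have h' : q.2.1 ≤ 5 + a := by omega
      simp [h', List.append_assoc]
    · have habs : ¬ |q.2.1 - a| ≤ 5 := by rw [abs_of_nonneg (by omega)]; omega
      have hstep : pvGroupStepA (some a, g, gs) q = (some q.2.1, [(q.1, q.2.2)], gs ++ [pvFmt g]) := by
        simp [pvGroupStepA, habs, pvFmt_ne_nil g hg]
      rw [List.foldl_cons, hstep,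
        ih q.2.1 [(q.1, q.2.2)] (gs ++ [pvFmt g]) hs' hhd (by simp)]
      have ht : List.takeWhile (fun r => decide (r.2.1 - a ≤ 5)) (q :: t) = [] := by
        rw [List.takeWhile_cons]
        simp only [decide_eq_true_eq]
        rw [if_neg h]
      have hd : List.dropWhile (fun r => decide (r.2.1 - a ≤ 5)) (q :: t) = q :: t := by
        rw [List.dropWhile_cons]
        simp only [decide_eq_true_eq]
        rw [if_neg h]
      rw [ht, hd, pvSplitB_cons]
      simp

-- ===== VERDICT (by name: the statement is the Claim_ definition above) =====
theorem extract_text_by_y_position_spec : Claim_equal_extract_text_by_y_position := by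
  intro ann _
  unfold Spec_extract_text_by_y_position extract_text_by_y_position extract_text_by_y_position_alt
  simp only [pv_skip]
  set F := (PySem.List.sorted (ann.map (fun a => (PySem.Str.strip a.1, a.2.2.2, a.2.2.1)))
    (fun p => p.2.1) false).filter (fun p => p.1 != "") with hF
  have hpw : F.Pairwise (fun p q => p.2.1 ≤ q.2.1) := by
    rw [hF]
    exact (PySem.List.sorted_pairwise _ _).sublist List.filter_sublist
  cases hFc : F with
  | nil => simp [pvFinishA, pvSplitB]
  | cons p rest =>
    rw [hFc] at hpw
    have hstep : pvGroupStepA (none, [], []) p = (some p.2.1, [(p.1, p.2.2)], []) := by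
      simp [pvGroupStepA]
    rw [List.foldl_cons, hstep,
      pv_main rest p.2.1 [(p.1, p.2.2)] [] (List.pairwise_cons.mp hpw).2
        (List.pairwise_cons.mp hpw).1 (by simp)]
    rw [pvSplitB_cons]
    simp
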